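-- pv_equiv track=rewrite | github.com/jms7446/hackerrank | baekjoon/alg-study/w20/p4_p15486.py | solve
-- ===== SOURCE A (Python) =====
-- def solve(n, pairs):
--     dp = [0] * (n + 50)     # t <= 50 (for skip check condition)
--     for i in reversed(range(n)):
--         t, p = pairs[i]
--         income = dp[i + 1]
--         complete_day = i + t - 1
--         if complete_day < n:
--             income = max(income, p + dp[complete_day + 1])
--         dp[i] = income
--     return dp[0]
-- ===== SOURCE B (Python) =====
-- def solve(n, pairs):
--     if n <= 0:
--         return 0
--     best = [0] * (n + 1)
--     for i in range(n):
--         t, p = pairs[i]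
--         if best[i] > best[i + 1]:
--             best[i + 1] = best[i]
--         if i + t <= n and best[i] + p > best[i + t]:
--             best[i + t] = best[i] + p
--     return best[n]
-- ===== Notes on version B (the rewrite author's own statement) =====
-- stated objective: alternative
-- what changed: Replaced the backward pull-DP (dp[i] computed from later days, iterating i from n-1 down to 0 over an n+50 scratch array) by a forward push-DP with relaxation over an n+1 array: best[i+1] and best[i+t] are relaxed from best[i] while iterating i upward, and best[n] is returned (0 immediately when there are no days).
-- outside the precondition, e.g. on solve(2, [(0, 5), (1, 3)]): A returns 5, B returns 3; on solve(1, [(-5, 3)]): A returns 3, B raises IndexError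
import Mathlib
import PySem

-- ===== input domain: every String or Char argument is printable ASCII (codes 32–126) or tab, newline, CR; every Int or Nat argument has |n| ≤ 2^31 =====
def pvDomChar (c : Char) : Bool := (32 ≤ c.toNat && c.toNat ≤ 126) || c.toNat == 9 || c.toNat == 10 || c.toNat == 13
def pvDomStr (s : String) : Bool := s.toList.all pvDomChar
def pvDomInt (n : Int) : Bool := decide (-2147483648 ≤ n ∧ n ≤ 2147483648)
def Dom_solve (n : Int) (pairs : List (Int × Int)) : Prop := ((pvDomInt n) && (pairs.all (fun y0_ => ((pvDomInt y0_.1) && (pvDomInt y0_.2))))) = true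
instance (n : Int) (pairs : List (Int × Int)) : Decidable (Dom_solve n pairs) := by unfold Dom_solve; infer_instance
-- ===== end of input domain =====

-- B replaces A's backward pull-DP (dp[i] from later days, i = n-1 … 0, array of n+50)
-- by a forward push-DP with relaxation on an (n+1)-array; same O(n) cost, different traversal.

-- ===== PORT A =====
-- the body of A's backward loop, for one day i
def stepA (n : Int) (pairs : List (Int × Int)) (dp : List Int) (i : Int) : List Int :=
  let tp := PySem.List.pyGetD pairs i (0, 0)
  let income := PySem.List.pyGetD dp (i + 1) 0
  let complete_day := i + tp.1 - 1
  let income := if complete_day < n then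
      max income (tp.2 + PySem.List.pyGetD dp (complete_day + 1) 0)
    else income
  PySem.List.pySetD dp i income

def solve (n : Int) (pairs : List (Int × Int)) : Int :=
  let dp : List Int := List.replicate (n + 50).toNat 0
  let dp := ((PySem.List.pyRange 0 n 1).reverse).foldl (stepA n pairs) dp
  PySem.List.pyGetD dp 0 0

-- ===== PORT B =====
-- the body of B's forward loop: relax best[i+1] and best[i+t] from best[i]
def stepB (n : Int) (pairs : List (Int × Int)) (b : List Int) (i : Int) : List Int :=
  let tp := PySem.List.pyGetD pairs i (0, 0)
  let b := if PySem.List.pyGetD b i 0 > PySem.List.pyGetD b (i + 1) 0 then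
      PySem.List.pySetD b (i + 1) (PySem.List.pyGetD b i 0)
    else b
  let b := if i + tp.1 ≤ n ∧ PySem.List.pyGetD b i 0 + tp.2 > PySem.List.pyGetD b (i + tp.1) 0 then
      PySem.List.pySetD b (i + tp.1) (PySem.List.pyGetD b i 0 + tp.2)
    else b
  b

def solve_alt (n : Int) (pairs : List (Int × Int)) : Int :=
  if n ≤ 0 then 0
  else
    let best : List Int := List.replicate (n + 1).toNat 0
    let best := (PySem.List.pyRange 0 n 1).foldl (stepB n pairs) best
    PySem.List.pyGetD best n 0

-- ===== PRECONDITION & SPEC =====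
-- Pre_ restricts to the task's natural domain (plus the n ≤ 0 no-day case): it excludes
-- inputs with a non-positive job duration t among the first n pairs, on which A still
-- returns a value that comes from Python negative-index wraparound or from dp cells the
-- backward loop has not yet written — accidents of A's implementation (and B's natural
-- forward loop raises on deeply negative t); n ≤ -50, where A raises, is also outside.
def Pre_solve (n : Int) (pairs : List (Int × Int)) : Prop :=
  -50 < n ∧ n ≤ pairs.length ∧ ∀ pr ∈ pairs.take n.toNat, 1 ≤ pr.1
instance (n : Int) (pairs : List (Int × Int)) : Decidable (Pre_solve n pairs) := by
  unfold Pre_solve; infer_instance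

def pvWitness_solve : Int × (List (Int × Int)) := (3, [(1, 5), (2, 4), (1, 2)])

def Spec_solve (n : Int) (pairs : List (Int × Int)) (out : Int) : Prop := out = solve_alt n pairs
instance (n : Int) (pairs : List (Int × Int)) (out : Int) : Decidable (Spec_solve n pairs out) := by
  unfold Spec_solve; infer_instance

-- ===== CLAIM (what is proved, stated in full; the proofs are below) =====
def Claim_equal_solve : Prop := ∀ (n : Int) (pairs : List (Int × Int)),
  Dom_solve n pairs → Pre_solve n pairs → Spec_solve n pairs (solve n pairs)

-- ===== LEMMAS AND PROOFS =====

-- The optimal income from day i on (the recurrence both programs implement).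
def OPT (f : ℕ → Int × Int) (N : ℕ) (i : ℕ) : Int :=
  if h : i < N then
    if h2 : 1 ≤ (f i).1 ∧ (i : Int) + (f i).1 ≤ (N : Int) then
      max (OPT f N (i + 1)) ((f i).2 + OPT f N (i + (f i).1.toNat))
    else OPT f N (i + 1)
  else 0
termination_by N - i
decreasing_by all_goals omega

theorem OPT_stop (f : ℕ → Int × Int) (N i : ℕ) (h : N ≤ i) : OPT f N i = 0 := by
  rw [OPT]; simp [Nat.not_lt.mpr h]

theorem OPT_succ_le (f : ℕ → Int × Int) (N i : ℕ) : OPT f N (i + 1) ≤ OPT f N i := by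
  by_cases h : i < N
  · conv_rhs => rw [OPT, dif_pos h]
    split_ifs with h2
    · exact le_max_left _ _
    · exact le_refl _
  · rw [OPT_stop f N i (Nat.le_of_not_lt h), OPT_stop f N (i+1) (by omega)]

theorem OPT_take (f : ℕ → Int × Int) (N i : ℕ) (hi : i < N)
    (ht : 1 ≤ (f i).1) (hN : (i : Int) + (f i).1 ≤ (N : Int)) :
    (f i).2 + OPT f N (i + (f i).1.toNat) ≤ OPT f N i := by
  conv_rhs => rw [OPT, dif_pos hi, dif_pos ⟨ht, hN⟩]
  exact le_max_right _ _

-- getD after set, with an explicit range side condition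
theorem getD_set_eq_ite (l : List Int) (m j : ℕ) (v : Int) :
    (l.set m v).getD j 0 = if j = m ∧ m < l.length then v else l.getD j 0 := by
  simp only [List.getD, List.getElem?_set]
  split_ifs with h1 h2 h3 <;> simp_all

theorem getD_replicate_zero (k j : ℕ) : (List.replicate k (0 : Int)).getD j 0 = 0 := by
  simp only [List.getD, List.getElem?_replicate]
  split_ifs <;> simp

-- max over j ∈ [i, N] of best[j] + OPT j (the exchange-argument potential for B)
def MX (f : ℕ → Int × Int) (N : ℕ) (b : List Int) (i : ℕ) : Int :=
  if i < N then max (b.getD i 0 + OPT f N i) (MX f N b (i + 1))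
  else b.getD N 0 + OPT f N N
termination_by N - i
decreasing_by all_goals omega

theorem le_MX (f : ℕ → Int × Int) (N : ℕ) (b : List Int) :
    ∀ (d i j : ℕ), i + d = N → i ≤ j → j ≤ N →
      b.getD j 0 + OPT f N j ≤ MX f N b i := by
  intro d
  induction d with
  | zero =>
    intro i j hd h1 h2
    have hij : i = N := by omega
    have hj : j = N := by omega
    subst hij; subst hj
    rw [MX, if_neg (by omega)]
  | succ d ih =>
    intro i j hd h1 h2
    rw [MX, if_pos (by omega)]
    rcases Nat.eq_or_lt_of_le h1 with rfl | hlt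
    · exact le_max_left _ _
    · exact le_trans (ih (i + 1) j (by omega) hlt h2) (le_max_right _ _)

theorem MX_le (f : ℕ → Int × Int) (N : ℕ) (b : List Int) {c : Int} :
    ∀ (d i : ℕ), i + d = N →
      (∀ j, i ≤ j → j ≤ N → b.getD j 0 + OPT f N j ≤ c) →
      MX f N b i ≤ c := by
  intro d
  induction d with
  | zero =>
    intro i hd h
    rw [MX, if_neg (by omega)]
    exact h N (by omega) (le_refl _)
  | succ d ih =>
    intro i hd h
    rw [MX, if_pos (by omega)]
    exact max_le (h i (le_refl _) (by omega))
      (ih (i + 1) (by omega) (fun j hj hj2 => h j (by omega) hj2))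

-- ===== A-side: the backward loop fills dp with OPT =====

theorem stepA_eq (n : Int) (pairs : List (Int × Int)) (f : ℕ → Int × Int)
    (hf : ∀ m : ℕ, PySem.List.pyGetD pairs (m : Int) (0, 0) = f m)
    (N : ℕ) (hn : n = (N : Int)) (k : ℕ) (hk : k < N)
    (htk : 1 ≤ (f k).1) (dp : List Int)
    (hinv : ∀ j : ℕ, dp.getD j 0 = if k + 1 ≤ j then OPT f N j else 0) :
    stepA n pairs dp (k : Int) = dp.set k (OPT f N k) := by
  simp only [stepA]
  rw [hf k]
  have e1 : (k : Int) + 1 = ((k + 1 : ℕ) : Int) := by push_cast; ring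
  have ht0 : (0 : Int) ≤ (f k).1 := by omega
  by_cases hg : (k : Int) + (f k).1 ≤ (N : Int)
  · have e2 : (k : Int) + (f k).1 - 1 + 1 = ((k + (f k).1.toNat : ℕ) : Int) := by
      push_cast [Int.toNat_of_nonneg ht0]; ring
    rw [if_pos (by omega : (k : Int) + (f k).1 - 1 < n)]
    rw [e1, e2]
    simp only [PySem.List.pyGetD_natCast, PySem.List.pySetD_natCast]
    rw [hinv (k + 1), hinv (k + (f k).1.toNat)]
    rw [if_pos (le_refl _), if_pos (by omega : k + 1 ≤ k + (f k).1.toNat)]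
    congr 1
    conv_rhs => rw [OPT, dif_pos hk, dif_pos ⟨htk, hg⟩]
  · rw [if_neg (by omega : ¬ ((k : Int) + (f k).1 - 1 < n))]
    rw [e1]
    simp only [PySem.List.pyGetD_natCast, PySem.List.pySetD_natCast]
    rw [hinv (k + 1), if_pos (le_refl _)]
    congr 1
    conv_rhs => rw [OPT, dif_pos hk, dif_neg (by tauto : ¬ (1 ≤ (f k).1 ∧ (k : Int) + (f k).1 ≤ (N : Int)))]

theorem A_loop (n : Int) (pairs : List (Int × Int)) (f : ℕ → Int × Int)
    (hf : ∀ m : ℕ, PySem.List.pyGetD pairs (m : Int) (0, 0) = f m)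
    (N : ℕ) (hn : n = (N : Int))
    (ht : ∀ j, j < N → 1 ≤ (f j).1) :
    ∀ (k : ℕ), k ≤ N → ∀ dp : List Int, dp.length = N + 50 →
      (∀ j : ℕ, dp.getD j 0 = if k ≤ j then OPT f N j else 0) →
      ∀ j : ℕ,
        (((PySem.List.pyRange 0 (k : Int) 1).reverse).foldl (stepA n pairs) dp).getD j 0
          = OPT f N j := by
  intro k
  induction k with
  | zero =>
    intro _ dp hlen hinv j
    rw [PySem.List.pyRange_one_eq_nil (by omega)]
    simpa using hinv j
  | succ k ih =>
    intro hk dp hlen hinv j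
    have e1 : ((k + 1 : ℕ) : Int) = (k : Int) + 1 := by push_cast; ring
    rw [e1, PySem.List.pyRange_one_succ_right (by positivity), List.reverse_append]
    simp only [List.reverse_cons, List.reverse_nil, List.nil_append, List.singleton_append,
      List.foldl_cons]
    rw [stepA_eq n pairs f hf N hn k (by omega) (ht k (by omega)) dp
      (fun j => hinv j)]
    refine ih (by omega) _ (by simpa using hlen) (fun j => ?_) j
    rw [getD_set_eq_ite]
    by_cases hj : j = k
    · subst hj
      rw [if_pos ⟨rfl, by omega⟩, if_pos (le_refl _)]
    · rw [if_neg (fun h => hj h.1), hinv j]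
      by_cases hkj : k ≤ j
      · rw [if_pos (by omega), if_pos hkj]
      · rw [if_neg (by omega), if_neg hkj]

-- ===== B-side: forward relaxation preserves the potential MX =====

theorem stepB_length (n : Int) (pairs : List (Int × Int)) (b : List Int) (i : Int) :
    (stepB n pairs b i).length = b.length := by
  simp only [stepB]
  split_ifs <;> simp [PySem.List.length_pySetD]

theorem B_step (n : Int) (pairs : List (Int × Int)) (f : ℕ → Int × Int)
    (hf : ∀ m : ℕ, PySem.List.pyGetD pairs (m : Int) (0, 0) = f m)
    (N : ℕ) (hn : n = (N : Int)) (k : ℕ) (hk : k < N)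
    (htk : 1 ≤ (f k).1) (b : List Int) (hb : b.length = N + 1) :
    MX f N (stepB n pairs b (k : Int)) (k + 1) = MX f N b k := by
  set t : Int := (f k).1 with hT
  set p : Int := (f k).2 with hP
  set T : ℕ := t.toNat with hTT
  have ht0 : (0 : Int) ≤ t := by omega
  have hTcast : (T : Int) = t := Int.toNat_of_nonneg ht0
  have hT1 : 1 ≤ T := by omega
  have e1 : (k : Int) + 1 = ((k + 1 : ℕ) : Int) := by push_cast; ring
  have e2 : (k : Int) + t = ((k + T : ℕ) : Int) := by push_cast [hTcast]; ring
  -- b1: the state after the first relaxation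
  have hb1 : ∃ b1 : List Int, stepB n pairs b (k : Int) =
      (if (k : Int) + t ≤ n ∧ b1.getD k 0 + p > b1.getD (k + T) 0 then
        b1.set (k + T) (b1.getD k 0 + p) else b1) ∧
      b1.length = N + 1 ∧
      (∀ j : ℕ, b1.getD j 0 = if j = k + 1 then max (b.getD (k + 1) 0) (b.getD k 0)
        else b.getD j 0) := by
    refine ⟨if b.getD k 0 > b.getD (k + 1) 0 then b.set (k + 1) (b.getD k 0) else b, ?_, ?_, ?_⟩
    · simp only [stepB]
      rw [hf k, ← hT, ← hP, e1, e2]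
      simp only [PySem.List.pyGetD_natCast, PySem.List.pySetD_natCast]
    · split_ifs <;> simp [hb]
    · intro j
      split_ifs with h1 h2 h2
      · subst h2
        rw [getD_set_eq_ite, if_pos ⟨rfl, by omega⟩, max_eq_right (le_of_lt h1)]
      · rw [getD_set_eq_ite, if_neg (fun h => h2 h.1)]
      · subst h2
        rw [max_eq_left (not_lt.mp h1)]
      · rfl
  obtain ⟨b1, hsb, hb1len, hb1get⟩ := hb1
  have hb1k : b1.getD k 0 = b.getD k 0 := by rw [hb1get k, if_neg (by omega)]
  set b2 : List Int := stepB n pairs b (k : Int) with hb2def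
  -- lower bounds on entries of b2
  have hb2ge1 : ∀ j : ℕ, b1.getD j 0 ≤ b2.getD j 0 := by
    intro j
    rw [hsb]
    split_ifs with h
    · rw [getD_set_eq_ite]
      split_ifs with h2
      · have hj : j = k + T := h2.1
        subst hj
        omega
      · exact le_refl _
    · exact le_refl _
  have hbge : ∀ j : ℕ, b.getD j 0 ≤ b2.getD j 0 := by
    intro j
    refine le_trans ?_ (hb2ge1 j)
    rw [hb1get j]
    split_ifs with h1
    · subst h1; exact le_max_left _ _
    · exact le_refl _
  have hb2k1 : b.getD k 0 ≤ b2.getD (k + 1) 0 := by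
    refine le_trans ?_ (hb2ge1 (k + 1))
    rw [hb1get (k + 1), if_pos rfl]
    exact le_max_right _ _
  have hb2kT : (k : Int) + t ≤ n → b.getD k 0 + p ≤ b2.getD (k + T) 0 := by
    intro hg
    rw [hsb]
    by_cases hc : b1.getD k 0 + p > b1.getD (k + T) 0
    · rw [if_pos ⟨hg, hc⟩, getD_set_eq_ite, if_pos ⟨rfl, by omega⟩, hb1k]
    · rw [if_neg (fun h => hc h.2)]
      rw [hb1k] at hc
      have := hb1get (k + T)
      omega
  -- facts sending entries of b into MX f N b k
  have hbj : ∀ j : ℕ, k ≤ j → j ≤ N → b.getD j 0 + OPT f N j ≤ MX f N b k :=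
    fun j hj1 hj2 => le_MX f N b (N - k) k j (by omega) hj1 hj2
  have hbk1 : b.getD k 0 + OPT f N (k + 1) ≤ MX f N b k := by
    have h1 := OPT_succ_le f N k
    have h2 := hbj k (le_refl _) (by omega)
    omega
  have hbkT : (k : Int) + t ≤ n → b.getD k 0 + p + OPT f N (k + T) ≤ MX f N b k := by
    intro hg
    have h1 : p + OPT f N (k + T) ≤ OPT f N k :=
      OPT_take f N k hk htk (by rw [← hT, ← hn]; exact hg)
    have h2 := hbj k (le_refl _) (by omega)
    omega
  -- entries of b1 into MX f N b k
  have hb1j : ∀ j : ℕ, k + 1 ≤ j → j ≤ N → b1.getD j 0 + OPT f N j ≤ MX f N b k := by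
    intro j hj1 hj2
    rw [hb1get j]
    split_ifs with h1
    · subst h1
      rcases max_cases (b.getD (k + 1) 0) (b.getD k 0) with ⟨he, _⟩ | ⟨he, _⟩
      · rw [he]; exact hbj (k + 1) (by omega) hj2
      · rw [he]; exact hbk1
    · exact hbj j (by omega) hj2
  refine le_antisymm ?_ ?_
  · -- MX b2 (k+1) ≤ MX b k
    refine MX_le f N b2 (N - (k + 1)) (k + 1) (by omega) (fun j hj1 hj2 => ?_)
    rw [hsb]
    split_ifs with hc
    · rw [getD_set_eq_ite]
      split_ifs with hj
      · have hjeq : j = k + T := hj.1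
        subst hjeq
        rw [hb1k]
        exact hbkT hc.1
      · exact hb1j j hj1 hj2
    · exact hb1j j hj1 hj2
  · -- MX b k ≤ MX b2 (k+1)
    refine MX_le f N b (N - k) k (by omega) (fun j hj1 hj2 => ?_)
    have hmx2 : ∀ m : ℕ, k + 1 ≤ m → m ≤ N → b2.getD m 0 + OPT f N m ≤ MX f N b2 (k + 1) :=
      fun m h1 h2 => le_MX f N b2 (N - (k + 1)) (k + 1) m (by omega) h1 h2
    rcases Nat.eq_or_lt_of_le hj1 with rfl | hlt
    · -- j = k : use the OPT recurrence at k
      by_cases hg : (k : Int) + t ≤ (N : Int)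
      · have hOPT : OPT f N k = max (OPT f N (k + 1)) (p + OPT f N (k + T)) := by
          rw [OPT, dif_pos hk, dif_pos ⟨htk, by rw [← hT]; exact hg⟩]
        rw [hOPT]
        rcases max_cases (OPT f N (k + 1)) (p + OPT f N (k + T)) with ⟨he, _⟩ | ⟨he, _⟩ <;> rw [he]
        · have := hmx2 (k + 1) (le_refl _) (by omega)
          have := hb2k1
          omega
        · have := hmx2 (k + T) (by omega) (by omega)
          have := hb2kT (by rw [hn]; exact hg)
          omega
      · have hOPT : OPT f N k = OPT f N (k + 1) := by
          rw [OPT, dif_pos hk, dif_neg]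
          intro hcon
          exact hg (by rw [hT]; exact hcon.2)
        rw [hOPT]
        have := hmx2 (k + 1) (le_refl _) (by omega)
        have := hb2k1
        omega
    · have := hmx2 j hlt hj2
      have := hbge j
      omega

theorem B_loop (n : Int) (pairs : List (Int × Int)) (f : ℕ → Int × Int)
    (hf : ∀ m : ℕ, PySem.List.pyGetD pairs (m : Int) (0, 0) = f m)
    (N : ℕ) (hn : n = (N : Int))
    (ht : ∀ j, j < N → 1 ≤ (f j).1) :
    ∀ (d k : ℕ), k + d = N → ∀ b : List Int, b.length = N + 1 →
      ((PySem.List.pyRange (k : Int) n 1).foldl (stepB n pairs) b).getD N 0 = MX f N b k := by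
  intro d
  induction d with
  | zero =>
    intro k hd b hb
    rw [hn, show k = N from by omega, PySem.List.pyRange_one_eq_nil (le_refl _)]
    rw [List.foldl_nil, MX, if_neg (by omega), OPT_stop f N N (le_refl _), add_zero]
  | succ d ih =>
    intro k hd b hb
    have hkN : ((k : Int)) < n := by omega
    rw [PySem.List.pyRange_one_cons hkN, List.foldl_cons]
    have e1 : (k : Int) + 1 = ((k + 1 : ℕ) : Int) := by push_cast; ring
    rw [e1, ih (k + 1) (by omega) _ (by rw [stepB_length]; exact hb)]
    exact B_step n pairs f hf N hn k (by omega) (ht k (by omega)) b hb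

theorem MX_replicate (f : ℕ → Int × Int) (N : ℕ) :
    ∀ (d i : ℕ), i + d = N → MX f N (List.replicate (N + 1) 0) i = OPT f N i := by
  intro d
  induction d with
  | zero =>
    intro i hi
    rw [MX, if_neg (by omega), getD_replicate_zero, zero_add,
      show i = N from by omega]
  | succ d ih =>
    intro i hi
    rw [MX, if_pos (by omega), getD_replicate_zero, zero_add, ih (i + 1) (by omega)]
    exact max_eq_left (OPT_succ_le f N i)

-- ===== final assembly =====
theorem solve_spec : Claim_equal_solve := by
  intro n pairs _ hpre
  obtain ⟨hn50, hlenI, htake⟩ := hpre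
  unfold Spec_solve
  by_cases hn0' : n ≤ 0
  · -- no days: A's loop is empty and dp[0] is still 0; B returns 0 at once
    simp only [solve, solve_alt, if_pos hn0']
    rw [PySem.List.pyRange_one_eq_nil hn0', List.reverse_nil, List.foldl_nil,
      PySem.List.pyGetD_zero, getD_replicate_zero]
  have hn0 : 0 ≤ n := by omega
  rw [solve_alt, if_neg hn0']
  simp only []
  set N : ℕ := n.toNat with hN
  have hn : n = (N : Int) := by omega
  set f : ℕ → Int × Int := fun m => pairs.getD m (0, 0) with hfdef
  have hf : ∀ m : ℕ, PySem.List.pyGetD pairs (m : Int) (0, 0) = f m := by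
    intro m
    rw [hfdef]
    simp [PySem.List.pyGetD_natCast]
  have hlen : N ≤ pairs.length := by omega
  have ht : ∀ j, j < N → 1 ≤ (f j).1 := by
    intro j hj
    have hjl : j < pairs.length := by omega
    have hval : f j = pairs[j] := by
      rw [hfdef]
      exact List.getD_eq_getElem pairs (0, 0) hjl
    have h3 : j < (pairs.take N).length := by
      simp only [List.length_take]
      omega
    have hmem := List.getElem_mem h3
    rw [List.getElem_take] at hmem
    have := htake pairs[j] hmem
    rw [hval]
    exact this
  have e50 : (n + 50).toNat = N + 50 := by omega
  have e1 : (n + 1).toNat = N + 1 := by omega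
  simp only [solve, e50, e1]
  -- A side
  have hA := A_loop n pairs f hf N hn ht N (le_refl _) (List.replicate (N + 50) 0)
    (by simp) (fun j => by
      rw [getD_replicate_zero]
      split_ifs with h
      · exact (OPT_stop f N j h).symm
      · rfl) 0
  rw [hn] at hA ⊢
  rw [PySem.List.pyGetD_zero]
  rw [show List.getD (((PySem.List.pyRange 0 ((N : ℕ) : Int) 1).reverse).foldl
      (stepA ((N : ℕ) : Int) pairs) (List.replicate (N + 50) 0)) 0 0 = OPT f N 0 from hA]
  -- B side
  have hB := B_loop ((N : ℕ) : Int) pairs f hf N rfl ht N 0 (by omega)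
    (List.replicate (N + 1) 0) (by simp)
  simp only [Nat.cast_zero] at hB
  rw [PySem.List.pyGetD_natCast]
  rw [hB, MX_replicate f N N 0 (by omega)]
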